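-- pv_equiv track=rewrite | github.com/davidkruzel/Boningner-polynomial | main (2).py | edge_list_sign
-- ===== SOURCE A (Python) =====
-- def edge_list_sign(gauss_code):
--   sign = 1
--   m = []
--   for i in range(len(gauss_code)):
--     if i < len(gauss_code) - 1:
--       a = gauss_code[i]
--       b = gauss_code[i + 1]
--       m.append([a, b, sign])
--       sign *= -1
--     else:
--       a = gauss_code[i]
--       b = gauss_code[0]
--       m.append([a, b, sign])
--   return(m)
-- ===== SOURCE B (Python) =====
-- def edge_list_sign(gauss_code):
--   rotated = gauss_code[1:] + gauss_code[:1]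
--   signs = [1, -1] * ((len(gauss_code) + 1) // 2)
--   return [list(t) for t in zip(gauss_code, rotated, signs)]
-- ===== Notes on version B (the rewrite author's own statement) =====
-- stated objective: alternative
-- what changed: Replaced the index loop carrying a running sign accumulator and a last-iteration branch by three staged whole-list passes: a rotated copy built by slicing, a precomputed alternating sign list built by list repetition, and a three-way zip of the lists.
import Mathlib
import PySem

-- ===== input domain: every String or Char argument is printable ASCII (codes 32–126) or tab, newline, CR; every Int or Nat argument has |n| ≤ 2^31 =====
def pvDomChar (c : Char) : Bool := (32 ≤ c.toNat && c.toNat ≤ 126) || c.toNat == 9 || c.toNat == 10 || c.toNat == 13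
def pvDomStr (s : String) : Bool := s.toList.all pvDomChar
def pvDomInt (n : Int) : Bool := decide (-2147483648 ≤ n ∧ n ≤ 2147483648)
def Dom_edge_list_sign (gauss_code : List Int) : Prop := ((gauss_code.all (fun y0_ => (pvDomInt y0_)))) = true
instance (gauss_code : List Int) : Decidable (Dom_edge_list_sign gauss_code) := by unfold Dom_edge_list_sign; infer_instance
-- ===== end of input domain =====

-- B replaces A's single stateful loop (running sign, last-iteration branch) by three staged
-- whole-list passes: a rotation by slicing, a repeated [1,-1] sign list, and a 3-way zip;
-- objective: alternative decomposition, same O(n) cost.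


-- ===== PORT A =====
def edge_list_sign (gauss_code : List Int) : List (List Int) :=
  let n : Int := gauss_code.length
  ((PySem.List.pyRange 0 n 1).foldl
    (fun (st : Int × List (List Int)) (i : Int) =>
      if i < n - 1 then
        let a := PySem.List.pyGetD gauss_code i 0
        let b := PySem.List.pyGetD gauss_code (i + 1) 0
        (st.1 * (-1), st.2 ++ [[a, b, st.1]])
      else
        let a := PySem.List.pyGetD gauss_code i 0
        let b := PySem.List.pyGetD gauss_code 0 0
        (st.1, st.2 ++ [[a, b, st.1]]))
    (1, [])).2

-- ===== PORT B =====
-- rotated = gauss_code[1:] + gauss_code[:1]; signs = [1,-1] * ((n+1)//2); zip of the three lists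
def edge_list_sign_alt (gauss_code : List Int) : List (List Int) :=
  let rotated := PySem.List.slice gauss_code (some 1) none ++ PySem.List.slice gauss_code none (some 1)
  let signs := PySem.List.pyRepeat ([1, -1] : List Int)
      (PySem.Int.floordiv ((gauss_code.length : Int) + 1) 2)
  List.zipWith3 (fun a b s => [a, b, s]) gauss_code rotated signs

-- ===== PRECONDITION & SPEC =====
def Spec_edge_list_sign (gauss_code : List Int) (out : List (List Int)) : Prop := out = edge_list_sign_alt gauss_code
instance (gauss_code : List Int) (out : List (List Int)) : Decidable (Spec_edge_list_sign gauss_code out) := by unfold Spec_edge_list_sign; infer_instance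

-- ===== CLAIM (what is proved, stated in full; the proofs are below) =====
def Claim_equal_edge_list_sign : Prop := ∀ (gauss_code : List Int), Dom_edge_list_sign gauss_code → Spec_edge_list_sign gauss_code (edge_list_sign gauss_code)

-- ===== LEMMAS AND PROOFS =====

-- canonical closed form both ports are proved equal to
def canonE (g : List Int) : List (List Int) :=
  (List.range g.length).map (fun i =>
    [g.getD i 0, g.getD ((i + 1) % g.length) 0, ((-1 : Int)) ^ i])

-- the loop body of A's port, named so the fold invariant can be stated
def stepA (g : List Int) (st : Int × List (List Int)) (i : Int) : Int × List (List Int) :=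
  if i < (g.length : Int) - 1 then
    let a := PySem.List.pyGetD g i 0
    let b := PySem.List.pyGetD g (i + 1) 0
    (st.1 * (-1), st.2 ++ [[a, b, st.1]])
  else
    let a := PySem.List.pyGetD g i 0
    let b := PySem.List.pyGetD g 0 0
    (st.1, st.2 ++ [[a, b, st.1]])

lemma edge_list_sign_eq_fold (g : List Int) :
    edge_list_sign g = ((PySem.List.pyRange 0 (g.length : Int) 1).foldl (stepA g) (1, [])).2 := rfl

-- invariant for the first k iterations (all in the if-branch)
lemma foldA_prefix (g : List Int) (k : Nat) (hk : (k : Int) ≤ (g.length : Int) - 1) :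
    (PySem.List.pyRange 0 (k : Int) 1).foldl (stepA g) (1, []) =
      ((-1) ^ k, (List.range k).map (fun (i : Nat) =>
        [g.getD i 0, g.getD (i + 1) 0, ((-1 : Int)) ^ i])) := by
  induction k with
  | zero => simp [PySem.List.pyRange_one_eq_nil]
  | succ k ih =>
    have hk' : (k : Int) ≤ (g.length : Int) - 1 := by push_cast at hk ⊢; omega
    have hsplit : PySem.List.pyRange 0 ((k : Int) + 1) 1 =
        PySem.List.pyRange 0 (k : Int) 1 ++ [(k : Int)] := by
      exact PySem.List.pyRange_one_succ_right (by exact_mod_cast Nat.zero_le k)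
    have hlt : (k : Int) < (g.length : Int) - 1 := by push_cast at hk; omega
    have hc : ((k + 1 : Nat) : Int) = (k : Int) + 1 := by push_cast; ring
    rw [hc, hsplit, List.foldl_append, ih hk']
    simp [stepA, hlt, List.range_succ, pow_succ, PySem.List.pyGetD_natCast]
    rw [show ((k : Int) + 1) = ((k + 1 : Nat) : Int) by push_cast; ring,
      PySem.List.pyGetD_natCast]
    simp [List.getD]

lemma A_eq_canon (g : List Int) : edge_list_sign g = canonE g := by
  rcases g with _ | ⟨x, t⟩
  · rfl
  set g : List Int := x :: t with hg
  have hn : 1 ≤ g.length := by simp [hg]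
  have hsplit : PySem.List.pyRange 0 (g.length : Int) 1 =
      PySem.List.pyRange 0 ((g.length - 1 : Nat) : Int) 1 ++ [((g.length - 1 : Nat) : Int)] := by
    have : ((g.length : Int)) = ((g.length - 1 : Nat) : Int) + 1 := by push_cast [hn]; omega
    rw [this]
    exact PySem.List.pyRange_one_succ_right (by exact_mod_cast Nat.zero_le _)
  have hA := foldA_prefix g (g.length - 1) (by push_cast [hn]; omega)
  rw [edge_list_sign_eq_fold, hsplit, List.foldl_append, hA]
  have hnot : ¬ (((g.length - 1 : Nat) : Int) < (g.length : Int) - 1) := by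
    push_cast [hn]; omega
  rw [List.foldl_cons, List.foldl_nil]
  unfold stepA
  rw [if_neg hnot]
  dsimp only
  unfold canonE
  have hrange : List.range g.length = List.range (g.length - 1) ++ [g.length - 1] := by
    conv_lhs => rw [show g.length = (g.length - 1) + 1 by omega]
    exact List.range_succ
  rw [hrange, List.map_append]
  have hmod : ((g.length - 1) + 1) % g.length = 0 := by
    rw [show (g.length - 1) + 1 = g.length by omega, Nat.mod_self]
  refine congrArg₂ (· ++ ·) ?_ ?_
  · apply List.map_congr_left
    intro i hi
    have hi' : i < g.length - 1 := List.mem_range.mp hi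
    have hmod' : (i + 1) % g.length = i + 1 := Nat.mod_eq_of_lt (by omega)
    simp [hmod']
  · simp [hmod, PySem.List.pyGetD_natCast, PySem.List.pyGetD_ofNat']

-- getElem access into zipWith3 (not in Mathlib)
lemma zipWith3_getElem {α β γ δ : Type} (f : α → β → γ → δ)
    (as : List α) (bs : List β) (cs : List γ) (i : Nat)
    (ha : i < as.length) (hb : i < bs.length) (hc : i < cs.length)
    (h : i < (List.zipWith3 f as bs cs).length) :
    (List.zipWith3 f as bs cs)[i] = f as[i] bs[i] cs[i] := by
  induction as generalizing bs cs i with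
  | nil => simp at ha
  | cons a as ih =>
    cases bs with
    | nil => simp at hb
    | cons b bs =>
      cases cs with
      | nil => simp at hc
      | cons c cs =>
        cases i with
        | zero => rfl
        | succ i =>
          simp only [List.zipWith3, List.getElem_cons_succ]
          apply ih bs cs i (by simpa using ha) (by simpa using hb) (by simpa using hc)

lemma zipWith3_length {α β γ δ : Type} (f : α → β → γ → δ)
    (as : List α) (bs : List β) (cs : List γ) :
    (List.zipWith3 f as bs cs).length = min as.length (min bs.length cs.length) := by
  induction as generalizing bs cs with
  | nil => simp [List.zipWith3]
  | cons a as ih =>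
    cases bs with
    | nil => simp [List.zipWith3]
    | cons b bs =>
      cases cs with
      | nil => simp [List.zipWith3]
      | cons c cs => simp [List.zipWith3, ih bs cs]

-- the repeated [1,-1] list is the parity-sign sequence
lemma repeat_signs (k : Nat) :
    (List.replicate k ([1, -1] : List Int)).flatten =
      (List.range (2 * k)).map (fun i => ((-1 : Int)) ^ i) := by
  induction k with
  | zero => simp
  | succ k ih =>
    rw [List.replicate_succ', List.flatten_append, ih]
    have h2 : 2 * (k + 1) = (2 * k + 1) + 1 := by omega
    rw [h2, List.range_succ, List.range_succ, List.map_append, List.map_append]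
    simp [pow_succ, pow_mul]

lemma B_eq_canon (g : List Int) : edge_list_sign_alt g = canonE g := by
  unfold edge_list_sign_alt canonE
  have hslice1 : PySem.List.slice g (some 1) none = g.tail := PySem.List.slice_from_one g
  have hslice2 : PySem.List.slice g none (some 1) = g.take 1 := by
    simpa using PySem.List.slice_to_natCast g 1
  have hflo : PySem.Int.floordiv ((g.length : Int) + 1) 2 = (((g.length + 1) / 2 : Nat) : Int) := by
    have : ((g.length : Int) + 1) = (((g.length + 1 : Nat)) : Int) := by push_cast; ring
    rw [this]
    exact_mod_cast PySem.Int.floordiv_natCast (g.length + 1) 2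
  have hrep : PySem.List.pyRepeat ([1, -1] : List Int)
      (PySem.Int.floordiv ((g.length : Int) + 1) 2) =
      (List.range (2 * ((g.length + 1) / 2))).map (fun i => ((-1 : Int)) ^ i) := by
    have hpr : PySem.List.pyRepeat ([1, -1] : List Int) (((g.length + 1) / 2 : Nat) : Int) =
        (List.replicate ((g.length + 1) / 2) ([1, -1] : List Int)).flatten := by
      simp [PySem.List.pyRepeat]
      congr 1
    rw [hflo, hpr, repeat_signs]
  rw [hslice1, hslice2, hrep]
  set n := g.length with hn
  have hrot : (g.tail ++ g.take 1).length = n := by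
    rcases g with _ | ⟨x, t⟩ <;> simp [hn]
  have hsig : ((List.range (2 * ((n + 1) / 2))).map (fun i => ((-1 : Int)) ^ i)).length = 2 * ((n + 1) / 2) := by simp
  apply List.ext_getElem
  · rw [zipWith3_length]
    simp [hrot, hn]
    omega
  · intro i h1 h2
    have hi : i < n := by
      have := h1; rw [zipWith3_length] at this
      simp [hrot, hsig] at this; omega
    rw [zipWith3_getElem _ _ _ _ i (by omega) (by rw [hrot]; omega) (by simp; omega) h1]
    simp only [List.getElem_map, List.getElem_range]
    have e1 : g[i]'(by omega) = g.getD i 0 := (List.getD_eq_getElem g 0 (by omega)).symm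
    have e2 : (g.tail ++ List.take 1 g)[i]'(by rw [hrot]; omega) = g.getD ((i + 1) % n) 0 := by
      by_cases hlast : i < n - 1
      · have htl : i < g.tail.length := by simp; omega
        rw [List.getElem_append_left htl]
        have hm : (i + 1) % n = i + 1 := Nat.mod_eq_of_lt (by omega)
        rw [hm]
        rcases g with _ | ⟨x, t⟩
        · simp [hn] at hi
        · simp only [List.tail_cons] at htl ⊢
          rw [List.getD_cons_succ]
          exact (List.getD_eq_getElem t 0 htl).symm
      · have hieq : i = n - 1 := by omega
        have hnpos : 0 < n := by omega
        have htl : g.tail.length = n - 1 := by simp [hn]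
        rw [List.getElem_append_right (by omega)]
        have hm : (i + 1) % n = 0 := by
          rw [hieq, show (n - 1) + 1 = n by omega, Nat.mod_self]
        rw [hm]
        rcases g with _ | ⟨x, t⟩
        · simp [hn] at hnpos
        · simp [hieq]
    rw [e1, e2]

-- ===== VERDICT (by name: the statement is the Claim_ definition above) =====
theorem edge_list_sign_spec : Claim_equal_edge_list_sign := by
  intro g _
  unfold Spec_edge_list_sign
  rw [A_eq_canon, B_eq_canon]
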